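-- pv_equiv track=rewrite | github.com/joshanashakya/dissertation | workspace/dataset/java-python/GeeksForGeeks/2444/A/2.py | countOne
-- ===== SOURCE A (Python) =====
-- def countOne(n):
--     count = 0
--     while (n):
--         n = n & (n - 1)
--         count += 1
--
--     if (count % 2 == 0):
--         return 1
--     else:
--         return 0
-- ===== SOURCE B (Python) =====
-- def countOne(n):
--     parity = 0
--     while n:
--         parity ^= (n & 1)
--         n >>= 1
--     return 1 if parity == 0 else 0
-- ===== Notes on version B (the rewrite author's own statement) =====
-- stated objective: idiomatic
-- what changed: B maintains the XOR parity bit directly while shifting n right one bit at a time, instead of A's counting loop that clears the lowest set bit with n&(n-1) and reduces the count mod 2 at the end.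
import Mathlib
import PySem

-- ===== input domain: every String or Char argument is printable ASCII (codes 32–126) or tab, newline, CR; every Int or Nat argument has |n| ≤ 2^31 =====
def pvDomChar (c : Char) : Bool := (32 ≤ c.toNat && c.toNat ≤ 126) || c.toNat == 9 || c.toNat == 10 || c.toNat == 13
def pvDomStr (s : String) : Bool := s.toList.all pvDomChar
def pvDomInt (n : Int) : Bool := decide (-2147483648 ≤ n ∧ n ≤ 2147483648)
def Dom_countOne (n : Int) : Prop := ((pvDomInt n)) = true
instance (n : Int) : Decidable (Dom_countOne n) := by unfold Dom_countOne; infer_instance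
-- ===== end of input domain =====

-- B maintains the XOR parity bit directly while shifting n right bit by bit, instead of A's
-- count of cleared lowest set bits reduced mod 2 (objective: idiomatic).


-- ===== PORT A =====
-- while n: n = n & (n-1); count += 1  — the n ≤ 0 guard only makes the recursion total:
-- on Pre_ (0 ≤ n) it coincides with Python's 'while n' (the loop diverges in Python for n < 0).
def countOneLoop (n : Int) (count : Int) : Int :=
  if _h : n ≤ 0 then count
  else countOneLoop (PySem.Int.band n (n - 1)) (count + 1)
termination_by n.toNat
decreasing_by
  rw [PySem.Int.band_of_nonneg (by omega) (by omega)]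
  have h1 : n.toNat &&& (n - 1).toNat ≤ (n - 1).toNat := Nat.and_le_right
  simp only [Int.toNat_natCast]
  omega

def countOne (n : Int) : Int :=
  let count := countOneLoop n 0
  if PySem.Int.mod count 2 = 0 then 1 else 0

-- ===== PORT B =====
-- while n: parity ^= (n & 1); n >>= 1  — same totality guard; Int >>> is Python's arithmetic shift.
def countOneAltLoop (n : Int) (parity : Int) : Int :=
  if _h : n ≤ 0 then parity
  else countOneAltLoop (n >>> (1:ℕ)) (PySem.Int.bxor parity (PySem.Int.band n 1))
termination_by n.toNat
decreasing_by
  have : n >>> (1:ℕ) = n / 2 := by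
    simpa using Int.shiftRight_eq_div_pow n 1
  rw [this]
  omega

def countOne_alt (n : Int) : Int :=
  if countOneAltLoop n 0 = 0 then 1 else 0

-- ===== PRECONDITION & SPEC =====
-- Pre_ excludes n < 0, on which Python A (and B) never returns: n & (n-1) keeps n negative forever.
def Pre_countOne (n : Int) : Prop := 0 ≤ n
instance (n : Int) : Decidable (Pre_countOne n) := by unfold Pre_countOne; infer_instance
def pvWitness_countOne : Int := (7)

def Spec_countOne (n : Int) (out : Int) : Prop := out = countOne_alt n
instance (n : Int) (out : Int) : Decidable (Spec_countOne n out) := by unfold Spec_countOne; infer_instance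

-- ===== CLAIM (what is proved, stated in full; the proofs are below) =====
def Claim_equal_countOne : Prop := ∀ (n : Int), Dom_countOne n → Pre_countOne n → Spec_countOne n (countOne n)

-- ===== LEMMAS AND PROOFS =====

-- odd m: the lowest set bit is bit 0, so m & (m-1) = m - 1
theorem land_pred_odd (m : Nat) (h : m % 2 = 1) : m &&& (m - 1) = m - 1 := by
  apply Nat.eq_of_testBit_eq
  intro i
  cases i with
  | zero => simp [Nat.testBit_zero]; omega
  | succ i =>
      rw [Nat.testBit_land]
      simp only [Nat.testBit_succ]
      have e : (m - 1) / 2 = m / 2 := by omega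
      rw [e, Bool.and_self]

-- even m: clearing the lowest set bit commutes with halving
theorem land_pred_even (m : Nat) (h : m % 2 = 0) (hm : 0 < m) :
    m &&& (m - 1) = 2 * (m / 2 &&& (m / 2 - 1)) := by
  apply Nat.eq_of_testBit_eq
  intro i
  cases i with
  | zero =>
      rw [Nat.testBit_land]
      have h2 : (2 * (m / 2 &&& (m / 2 - 1))) % 2 = 0 := by omega
      simp [Nat.testBit_zero, h, h2]
  | succ i =>
      rw [Nat.testBit_land]
      simp only [Nat.testBit_succ]
      have e1 : (m - 1) / 2 = m / 2 - 1 := by omega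
      have e2 : (2 * (m / 2 &&& (m / 2 - 1))) / 2 = m / 2 &&& (m / 2 - 1) := by omega
      rw [e1, e2, Nat.testBit_land]

-- doubling does not change the set-bit count
theorem bitCount_double (k : Nat) :
    PySem.Int.bitCount ((2 * k : Nat) : Int) = PySem.Int.bitCount (k : Int) := by
  rcases Nat.eq_zero_or_pos k with hk | hk
  · simp [hk]
  · have h := PySem.Int.bitCount_natCast (m := 2 * k) (by omega)
    have e1 : 2 * k % 2 = 0 := by omega
    have e2 : 2 * k / 2 = k := by omega
    rw [e1, e2] at h
    omega

-- A's loop step: n & (n-1) removes exactly one set bit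
theorem bitCount_land_pred (m : Nat) (hm : 0 < m) :
    PySem.Int.bitCount ((m : Nat) : Int) =
      PySem.Int.bitCount ((m &&& (m - 1) : Nat) : Int) + 1 := by
  induction m using Nat.strong_induction_on with
  | _ m ih =>
    rcases Nat.mod_two_eq_zero_or_one m with h | h
    · have hhalf : 0 < m / 2 := by omega
      rw [land_pred_even m h hm, bitCount_double]
      have ihh := ih (m / 2) (by omega) hhalf
      have hb := PySem.Int.bitCount_natCast (m := m) hm
      rw [h] at hb
      omega
    · rw [land_pred_odd m h]
      have hb := PySem.Int.bitCount_natCast (m := m) hm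
      rw [h] at hb
      rcases Nat.eq_zero_or_pos (m - 1) with h0 | hp
      · rw [h0]
        have h1 : m = 1 := by omega
        subst h1
        decide
      · have hb2 := PySem.Int.bitCount_natCast (m := m - 1) hp
        have e1 : (m - 1) % 2 = 0 := by omega
        have e2 : (m - 1) / 2 = m / 2 := by omega
        rw [e1, e2] at hb2
        omega

-- A's loop computes count + popcount
theorem loopA_eq (m : Nat) :
    ∀ c : Int, countOneLoop (m : Int) c = c + (PySem.Int.bitCount ((m : Nat) : Int) : Int) := by
  induction m using Nat.strong_induction_on with
  | _ m ih =>
    intro c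
    rcases Nat.eq_zero_or_pos m with h0 | hm
    · subst h0; rw [countOneLoop]; simp
    · rw [countOneLoop]
      have hg : ¬ ((m : Int) ≤ 0) := by omega
      rw [dif_neg hg]
      have e1 : (m : Int) - 1 = ((m - 1 : Nat) : Int) := by omega
      rw [e1, PySem.Int.band_natCast]
      rw [ih (m &&& (m - 1)) (by
        have := Nat.and_le_right (n := m) (m := m - 1); omega)]
      have := bitCount_land_pred m hm
      omega

theorem shift_natCast (m : Nat) : ((m : Int) >>> (1:ℕ)) = ((m / 2 : Nat) : Int) := by
  have h : ((m : Int) >>> (1:ℕ)) = (m : Int) / 2 := by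
    simpa using Int.shiftRight_eq_div_pow (m : Int) 1
  rw [h]
  omega

-- the per-bit parity recurrence for popcount mod 2
theorem bitCount_mod_two (m : Nat) (hm : 0 < m) :
    PySem.Int.bitCount ((m : Nat) : Int) % 2
      = (m % 2) ^^^ (PySem.Int.bitCount ((m / 2 : Nat) : Int) % 2) := by
  have hb := PySem.Int.bitCount_natCast (m := m) hm
  have hx : ∀ a b : Nat, a < 2 → b < 2 → a ^^^ b = (a + b) % 2 := by
    intro a b ha hb
    interval_cases a <;> interval_cases b <;> decide
  rw [hb, hx _ _ (by omega) (Nat.mod_lt _ (by omega))]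
  omega

-- B's loop computes parity XOR popcount-mod-2 (parity stays a 0/1 Nat throughout)
theorem loopB_eq (m : Nat) :
    ∀ p : Nat, countOneAltLoop (m : Int) (p : Int)
      = (((p ^^^ (PySem.Int.bitCount ((m : Nat) : Int) % 2)) : Nat) : Int) := by
  induction m using Nat.strong_induction_on with
  | _ m ih =>
    intro p
    rcases Nat.eq_zero_or_pos m with h0 | hm
    · subst h0; rw [countOneAltLoop]; simp
    · rw [countOneAltLoop]
      have hg : ¬ ((m : Int) ≤ 0) := by omega
      rw [dif_neg hg]
      have hmod : PySem.Int.band ((m : Nat) : Int) 1 = ((m % 2 : Nat) : Int) := by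
        rw [PySem.Int.band_one]
        exact_mod_cast PySem.Int.mod_natCast m 2
      rw [hmod, PySem.Int.bxor_natCast, shift_natCast, ih (m / 2) (by omega)]
      rw [Nat.xor_assoc, ← bitCount_mod_two m hm]

-- ===== VERDICT (by name: the statement is the Claim_ definition above) =====
theorem countOne_spec : Claim_equal_countOne := by
  intro n _ hpre
  have h0 : (0 : Int) ≤ n := hpre
  have hn : n = ((n.toNat : Nat) : Int) := by omega
  unfold Spec_countOne countOne countOne_alt
  rw [hn]
  show (if PySem.Int.mod (countOneLoop ((n.toNat : Nat) : Int) 0) 2 = 0 then (1:Int) else 0)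
      = (if countOneAltLoop ((n.toNat : Nat) : Int) 0 = 0 then (1:Int) else 0)
  have hB : countOneAltLoop ((n.toNat : Nat) : Int) 0
      = ((PySem.Int.bitCount ((n.toNat : Nat) : Int) % 2 : Nat) : Int) := by
    simpa using loopB_eq n.toNat 0
  have hmod : PySem.Int.mod ((PySem.Int.bitCount ((n.toNat : Nat) : Int) : Nat) : Int) 2
      = ((PySem.Int.bitCount ((n.toNat : Nat) : Int) % 2 : Nat) : Int) := by
    exact_mod_cast PySem.Int.mod_natCast _ 2
  rw [loopA_eq, hB, zero_add, hmod]
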